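-- pv_equiv track=rewrite | github.com/rnhkz/ProblemSolutions | Categories/categories.py | get_maximum_maxima2
-- ===== SOURCE A (Python) =====
-- def get_maximum_maxima2(categories):
--     #Dict:  Category : counter for occurnces in categories
--     #Dict2: Category : The maximum amount of times in a row counter for Categories was the highest counter
--     #                  after processing a single category in categories
--     #prevCategory: The previous category processed in categories
--
--     Dict = {category : 0 for category in categories}
--     Dict2 = {category : 0 for category in categories}
--     prevCategory = []
--
--     #We find the categories with the most amount of occurences after processing one category in categories
--     #The previously found categories are stored in prevCategory
--     currentMax = [0, {}]
--     for x, c in enumerate(categories):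
--         Dict[c] += 1
--         for i, v in dict.items(Dict):
--             if v > currentMax[0]:
--                 currentMax[0] = v
--                 currentMax[1] = {i}
--             elif v == currentMax[0]:
--                 currentMax[0] = v
--                 currentMax[1].add(i)
--         for i in currentMax[1]:
--             Dict2[i] += 1
--         prevCategory = currentMax[1]
--
--     return max(dict.values(Dict2))
-- ===== SOURCE B (Python) =====
-- def get_maximum_maxima2(categories):
--     # Amortized O(n): maintain the running-maxima set incrementally and record
--     # dwell intervals per category, finalizing them when the maximum increases.
--     cnt = {}
--     entry = {}   # category -> 1-based step at which it joined the current maxima set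
--     dwell = {}   # category -> completed dwell steps from finished intervals
--     maxima = []  # current maxima set (distinct categories)
--     m = 0
--     t = 0
--     for c in categories:
--         t += 1
--         cnt[c] = cnt.get(c, 0) + 1
--         if cnt[c] > m:
--             for j in maxima:
--                 dwell[j] = dwell.get(j, 0) + (t - entry[j])
--             m = cnt[c]
--             maxima = [c]
--             entry[c] = t
--         elif cnt[c] == m:
--             maxima.append(c)
--             entry[c] = t
--     for j in maxima:
--         dwell[j] = dwell.get(j, 0) + (t - entry[j] + 1)
--     return max(dwell.values())
-- ===== Notes on version B (the rewrite author's own statement) =====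
-- stated objective: faster
-- what changed: Instead of rescanning the whole count dictionary after every element and incrementing a per-category counter for each member of the maxima set at every step, B maintains the running-maxima set incrementally (O(1) comparison of the updated count against the running maximum) and records dwell intervals per category, finalizing each member's interval only when the maximum increases and once at the end.
import Mathlib
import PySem

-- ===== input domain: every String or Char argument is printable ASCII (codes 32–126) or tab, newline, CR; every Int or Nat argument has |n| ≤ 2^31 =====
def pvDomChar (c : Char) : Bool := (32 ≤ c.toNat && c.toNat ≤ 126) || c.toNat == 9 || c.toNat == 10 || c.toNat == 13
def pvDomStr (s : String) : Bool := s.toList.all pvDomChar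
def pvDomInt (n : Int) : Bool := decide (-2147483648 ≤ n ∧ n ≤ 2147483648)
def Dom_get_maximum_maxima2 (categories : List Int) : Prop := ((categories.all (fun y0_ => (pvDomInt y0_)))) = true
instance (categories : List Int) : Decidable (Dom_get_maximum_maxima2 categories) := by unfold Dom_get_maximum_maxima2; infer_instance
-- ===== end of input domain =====

-- B maintains the maxima set incrementally and records dwell intervals per category
-- (finalized when the running maximum increases), replacing A's full rescan of the
-- count dictionary at every step: amortized O(n) instead of O(n*k).


-- ===== PORT A =====
-- loop state of A: (Dict, Dict2, currentMax[0], currentMax[1]); prevCategory is dead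
-- (assigned, never read) and is omitted. Python's initial currentMax[1] is the empty
-- dict {}, used only as an (empty) collection before the first reset: ported as the
-- empty set. The iteration 'for i in currentMax[1]' runs over a Python set; its hash
-- order only permutes +1 updates to distinct Dict2 keys, so Dict2 does not depend on it.
structure ASt where
  d : PySem.Dict Int Int
  d2 : PySem.Dict Int Int
  m : Int
  s : PySem.Set Int
deriving Repr

def ascan (ms : Int × PySem.Set Int) (iv : Int × Int) : Int × PySem.Set Int :=
  if ms.1 < iv.2 then (iv.2, PySem.Set.ofList [iv.1])
  else if iv.2 == ms.1 then (ms.1, PySem.Set.add ms.2 iv.1)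
  else ms

def astep (st : ASt) (c : Int) : ASt :=
  let d := st.d.insert c (st.d.getD c 0 + 1)
  let ms := d.items.foldl ascan (st.m, st.s)
  let d2 := ms.2.foldl (fun d2 i => d2.insert i (d2.getD i 0 + 1)) st.d2
  ⟨d, d2, ms.1, ms.2⟩

def get_maximum_maxima2 (categories : List Int) : Int :=
  let d0 : PySem.Dict Int Int := categories.foldl (fun d c => d.insert c 0) PySem.Dict.empty
  let d20 : PySem.Dict Int Int := categories.foldl (fun d c => d.insert c 0) PySem.Dict.empty
  let st := categories.foldl astep ⟨d0, d20, 0, PySem.Set.empty⟩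
  -- max() raises ValueError on an empty sequence: Pre_ excludes categories = [],
  -- so max? is some here; .getD 0 is never the default.
  (PySem.List.max? st.d2.values (fun x => x)).getD 0

-- ===== PORT B =====
-- loop state of B: counts, entry step of each current maxima-set member, finalized
-- dwell totals, the maxima set as a list (kept duplicate-free by the algorithm),
-- the running maximum m and the 1-based step counter t.
structure BSt where
  cnt : PySem.Dict Int Int
  entry : PySem.Dict Int Int
  dwell : PySem.Dict Int Int
  maxima : List Int
  m : Int
  t : Int
deriving Repr

def bstep (st : BSt) (c : Int) : BSt :=
  let t := st.t + 1
  let cnt := st.cnt.insert c (st.cnt.getD c 0 + 1)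
  let v := cnt.getD c 0
  if st.m < v then
    { cnt := cnt,
      entry := st.entry.insert c t,
      dwell := st.maxima.foldl (fun dw j => dw.insert j (dw.getD j 0 + (t - st.entry.getD j 0))) st.dwell,
      maxima := [c], m := v, t := t }
  else if v == st.m then
    { st with cnt := cnt, entry := st.entry.insert c t, maxima := st.maxima ++ [c], t := t }
  else { st with cnt := cnt, t := t }

def get_maximum_maxima2_alt (categories : List Int) : Int :=
  let st := categories.foldl bstep ⟨PySem.Dict.empty, PySem.Dict.empty, PySem.Dict.empty, [], 0, 0⟩
  let dwell := st.maxima.foldl (fun dw j => dw.insert j (dw.getD j 0 + (st.t - st.entry.getD j 0 + 1))) st.dwell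
  -- max() raises ValueError on empty: Pre_ excludes categories = [].
  (PySem.List.max? dwell.values (fun x => x)).getD 0

-- ===== PRECONDITION & SPEC =====
-- On categories = [] both A and B raise ValueError (max() of an empty sequence).
def Pre_get_maximum_maxima2 (categories : List Int) : Prop := categories ≠ []
instance (categories : List Int) : Decidable (Pre_get_maximum_maxima2 categories) := by unfold Pre_get_maximum_maxima2; infer_instance
def pvWitness_get_maximum_maxima2 : List Int := [1, 2, 1]

def Spec_get_maximum_maxima2 (categories : List Int) (out : Int) : Prop := out = get_maximum_maxima2_alt categories
instance (categories : List Int) (out : Int) : Decidable (Spec_get_maximum_maxima2 categories out) := by unfold Spec_get_maximum_maxima2; infer_instance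

-- ===== CLAIM (what is proved, stated in full; the proofs are below) =====
def Claim_equal_get_maximum_maxima2 : Prop := ∀ (categories : List Int), Dom_get_maximum_maxima2 categories → Pre_get_maximum_maxima2 categories → Spec_get_maximum_maxima2 categories (get_maximum_maxima2 categories)

-- ===== LEMMAS AND PROOFS =====

-- the coupling invariant between A's and B's loop states after processing prefix p of l
structure PVInv (l p : List Int) (a : ASt) (b : BSt) : Prop where
  psubl : ∀ j ∈ p, j ∈ l
  keysd : a.d.keys = PySem.Set.ofList l
  countd : ∀ j, a.d.getD j 0 = (p.count j : Int)
  countb : ∀ j, b.cnt.getD j 0 = (p.count j : Int)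
  meq : a.m = b.m
  seq : a.s = b.maxima
  nodupmx : b.maxima.Nodup
  memmx : ∀ j, j ∈ b.maxima ↔ (0 < p.count j ∧ (p.count j : Int) = b.m)
  lemax : ∀ j, (p.count j : Int) ≤ b.m
  achieved : 0 < b.m → ∃ j ∈ p, (p.count j : Int) = b.m
  teq : b.t = (p.length : Int)
  d2dwell : ∀ j, a.d2.getD j 0 =
      b.dwell.getD j 0 + (if j ∈ b.maxima then b.t - b.entry.getD j 0 + 1 else 0)
  keysd2 : a.d2.keys = PySem.Set.ofList l
  dwellkeys : ∀ j ∈ b.dwell.keys, j ∈ p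
  nodupdw : b.dwell.keys.Nodup
  entryle : ∀ j ∈ b.maxima, b.entry.getD j 0 ≤ b.t
  dwellnn : ∀ j, 0 ≤ b.dwell.getD j 0

-- a fold of 'insert j (getD j 0 + δ j)' over a duplicate-free list adds δ exactly to its members
theorem getD_foldl_insert_delta (js : List Int) (δ : Int → Int) (d : PySem.Dict Int Int)
    (hnd : js.Nodup) (x : Int) :
    (js.foldl (fun d j => d.insert j (d.getD j 0 + δ j)) d).getD x 0 =
      d.getD x 0 + (if x ∈ js then δ x else 0) := by
  induction js generalizing d with
  | nil => simp
  | cons j t ih =>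
    simp only [List.foldl_cons]
    have hnd' := hnd
    simp only [List.nodup_cons] at hnd'
    rw [ih _ hnd'.2]
    by_cases hx : x = j
    · subst hx
      simp [PySem.Dict.getD_insert_self, hnd'.1]
    · rw [PySem.Dict.getD_insert]
      rw [if_neg hx]
      by_cases hm : x ∈ t <;> simp [hm, hx]

theorem set_update_of_subset (s : PySem.Set Int) (xs : List Int) (h : ∀ x ∈ xs, x ∈ s) :
    PySem.Set.update s xs = s := by
  induction xs generalizing s with
  | nil => rfl
  | cons x t ih =>
    rw [PySem.Set.update_cons, PySem.Set.add_of_mem (h x (by simp))]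
    exact ih s (fun y hy => h y (by simp [hy]))

-- the add-only scan: all values ≤ M, every value-M key already in S ⇒ state unchanged
theorem scan_noop (L : List (Int × Int)) (M : Int) (S : PySem.Set Int)
    (hle : ∀ iv ∈ L, iv.2 ≤ M) (hmem : ∀ iv ∈ L, iv.2 = M → iv.1 ∈ S) :
    L.foldl ascan (M, S) = (M, S) := by
  induction L with
  | nil => rfl
  | cons iv t ih =>
    have h1 : ¬ M < iv.2 := not_lt.mpr (hle iv (by simp))
    simp only [List.foldl_cons, ascan]
    rw [if_neg h1]
    by_cases h2 : iv.2 = M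
    · simp only [h2, beq_self_eq_true, if_true]
      rw [PySem.Set.add_of_mem (hmem iv (by simp) h2)]
      exact ih (fun x hx => hle x (by simp [hx])) (fun x hx => hmem x (by simp [hx]))
    · simp only [beq_iff_eq, h2, if_false]
      exact ih (fun x hx => hle x (by simp [hx])) (fun x hx => hmem x (by simp [hx]))

-- the add-only scan with exactly one new value-M key c ∉ S ⇒ appends c
theorem scan_one (L : List (Int × Int)) (M : Int) (S : PySem.Set Int) (c : Int)
    (hle : ∀ iv ∈ L, iv.2 ≤ M) (hmem : ∀ iv ∈ L, iv.2 = M → iv.1 ∈ S ∨ iv.1 = c)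
    (hcL : (c, M) ∈ L) (hcS : c ∉ S) :
    L.foldl ascan (M, S) = (M, S ++ [c]) := by
  induction L with
  | nil => simp at hcL
  | cons iv t ih =>
    have h1 : ¬ M < iv.2 := not_lt.mpr (hle iv (by simp))
    simp only [List.foldl_cons, ascan]
    rw [if_neg h1]
    by_cases h2 : iv.2 = M
    · rcases hmem iv (by simp) h2 with hS | hc
      · simp only [h2, beq_self_eq_true, if_true]
        rw [PySem.Set.add_of_mem hS]
        have hcT : (c, M) ∈ t := by
          rcases List.mem_cons.mp hcL with h | h
          · exact absurd (by rw [← h] at hS; exact hS) hcS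
          · exact h
        exact ih (fun x hx => hle x (by simp [hx])) (fun x hx => hmem x (by simp [hx])) hcT
      · simp only [h2, beq_self_eq_true, if_true, hc]
        rw [PySem.Set.add_of_not_mem hcS]
        exact scan_noop t M (S ++ [c]) (fun x hx => hle x (by simp [hx]))
          (fun x hx hxm => by
            rcases hmem x (by simp [hx]) hxm with h | h
            · simp [h]
            · simp [h])
    · simp only [beq_iff_eq, h2, if_false]
      have hcT : (c, M) ∈ t := by
        rcases List.mem_cons.mp hcL with h | h
        · exact absurd (congrArg Prod.snd h).symm h2
        · exact h
      exact ih (fun x hx => hle x (by simp [hx])) (fun x hx => hmem x (by simp [hx])) hcT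

-- the scan meeting one key c of value V > M (all other values ≤ M) resets to (V, [c])
theorem scan_gtcase (L : List (Int × Int)) (M V : Int) (S : PySem.Set Int) (c : Int)
    (hMV : M < V)
    (hV : ∀ iv ∈ L, iv.1 = c → iv.2 = V)
    (hle : ∀ iv ∈ L, iv.1 ≠ c → iv.2 ≤ M)
    (hmem : ∀ iv ∈ L, iv.2 = M → iv.1 ∈ S)
    (hcL : (c, V) ∈ L) :
    L.foldl ascan (M, S) = (V, [c]) := by
  induction L with
  | nil => simp at hcL
  | cons iv t ih =>
    by_cases hc : iv.1 = c
    · have hv : iv.2 = V := hV iv (by simp) hc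
      simp only [List.foldl_cons, ascan]
      rw [if_pos (by rw [hv]; exact hMV)]
      have h3 : PySem.Set.ofList [iv.1] = [c] := by simp [PySem.Set.ofList, PySem.Set.add, hc]
      rw [hv, h3]
      exact scan_noop t V [c]
        (fun x hx => by
          by_cases hxc : x.1 = c
          · exact le_of_eq (hV x (by simp [hx]) hxc)
          · exact le_trans (hle x (by simp [hx]) hxc) (le_of_lt hMV))
        (fun x hx hxv => by
          by_cases hxc : x.1 = c
          · simp [hxc]
          · exact absurd hxv (by have := hle x (by simp [hx]) hxc; omega))
    · have h1 : ¬ M < iv.2 := not_lt.mpr (hle iv (by simp) hc)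
      simp only [List.foldl_cons, ascan]
      rw [if_neg h1]
      have hstep : (if (iv.2 == M) = true then (M, PySem.Set.add S iv.1) else (M, S)) = (M, S) := by
        by_cases h2 : iv.2 = M
        · simp [h2, PySem.Set.add_of_mem (hmem iv (by simp) h2)]
        · simp [h2]
      rw [hstep]
      have hcT : (c, V) ∈ t := by
        rcases List.mem_cons.mp hcL with h | h
        · exact absurd (congrArg Prod.fst h).symm hc
        · exact h
      exact ih (fun x hx hxc => hV x (by simp [hx]) hxc)
        (fun x hx hxc => hle x (by simp [hx]) hxc)
        (fun x hx hxv => hmem x (by simp [hx]) hxv) hcT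

-- membership in a Set.update
theorem mem_set_update (s : PySem.Set Int) (xs : List Int) (j : Int) :
    j ∈ PySem.Set.update s xs ↔ j ∈ s ∨ j ∈ xs := by
  induction xs generalizing s with
  | nil => simp [PySem.Set.update]
  | cons x t ih =>
    rw [PySem.Set.update_cons, ih]
    simp [PySem.Set.mem_add]
    tauto

theorem init_dict_getD (l : List Int) (d : PySem.Dict Int Int) (h : ∀ j, d.getD j 0 = 0) (j : Int) :
    (l.foldl (fun d c => d.insert c 0) d).getD j 0 = 0 := by
  induction l generalizing d with
  | nil => exact h j
  | cons c t ih =>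
    simp only [List.foldl_cons]
    exact ih _ (fun x => by rw [PySem.Dict.getD_insert]; split <;> simp [h])

theorem inv_init (l : List Int) :
    PVInv l [] ⟨l.foldl (fun d c => d.insert c 0) PySem.Dict.empty,
             l.foldl (fun d c => d.insert c 0) PySem.Dict.empty, 0, PySem.Set.empty⟩
          ⟨PySem.Dict.empty, PySem.Dict.empty, PySem.Dict.empty, [], 0, 0⟩ := by
  have hkeys : (l.foldl (fun d c => d.insert c 0) (PySem.Dict.empty : PySem.Dict Int Int)).keys
      = PySem.Set.ofList l := by
    rw [PySem.Dict.keys_foldl_insert (f := fun _ _ => (0 : Int))]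
    simp [PySem.Dict.keys_empty, PySem.Set.update_nil_left]
  have hget : ∀ j, (l.foldl (fun d c => d.insert c 0) (PySem.Dict.empty : PySem.Dict Int Int)).getD j 0 = 0 :=
    init_dict_getD l PySem.Dict.empty (fun j => by simp)
  refine ⟨?_, ?_, ?_, ?_, ?_, ?_, ?_, ?_, ?_, ?_, ?_, ?_, ?_, ?_, ?_, ?_, ?_⟩ <;>
    simp [hkeys, hget]

theorem inv_step (l p rest : List Int) (a : ASt) (b : BSt) (c : Int)
    (hl : l = p ++ c :: rest)
    (hinv : PVInv l p a b) : PVInv l (p ++ [c]) (astep a c) (bstep b c) := by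
  obtain ⟨psubl, keysd, countd, countb, meq, seq, nodupmx, memmx, lemax, achieved, teq,
    d2dwell, keysd2, dwellkeys, nodupdw, entryle, dwellnn⟩ := hinv
  have hc : c ∈ l := by rw [hl]; simp
  have hmemkeys : c ∈ a.d.keys := by rw [keysd]; exact (PySem.Set.mem_ofList l c).mpr hc
  have hcontains : a.d.contains c = true := (PySem.Dict.contains_iff_mem_keys a.d c).mpr hmemkeys
  have hkeys' : (a.d.insert c (a.d.getD c 0 + 1)).keys = PySem.Set.ofList l := by
    rw [PySem.Dict.keys_insert_of_contains a.d _ hcontains]; exact keysd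
  have hnodup' : (a.d.insert c (a.d.getD c 0 + 1)).keys.Nodup := by
    rw [hkeys']; exact PySem.Set.nodup_ofList l
  have hget' : ∀ j, (a.d.insert c (a.d.getD c 0 + 1)).getD j 0
      = if j = c then (p.count c : Int) + 1 else (p.count j : Int) := by
    intro j
    rw [PySem.Dict.getD_insert]
    by_cases h : j = c <;> simp [h, countd] <;> omega
  have hitems : (a.d.insert c (a.d.getD c 0 + 1)).items
      = (PySem.Set.ofList l).map (fun k => (k, (a.d.insert c (a.d.getD c 0 + 1)).getD k 0)) := by
    rw [PySem.Dict.items_eq_map_keys _ hnodup' 0, hkeys']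
  have hivmem : ∀ iv ∈ (a.d.insert c (a.d.getD c 0 + 1)).items,
      iv.1 ∈ l ∧ iv.2 = (if iv.1 = c then (p.count c : Int) + 1 else (p.count iv.1 : Int)) := by
    intro iv hiv
    rw [hitems] at hiv
    obtain ⟨k, hk, hkeq⟩ := List.mem_map.mp hiv
    refine ⟨?_, ?_⟩
    · rw [← hkeq]; exact (PySem.Set.mem_ofList l k).mp hk
    · rw [← hkeq]; simp [hget']
  have hcountN : ∀ j, (p ++ [c]).count j = p.count j + if j = c then 1 else 0 := by
    intro j
    by_cases h : j = c <;> simp [List.count_append, List.count_singleton, h] <;> omega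
  have hmemp : ∀ j ∈ b.maxima, j ∈ p := by
    intro j hj
    exact List.count_pos_iff.mp ((memmx j).mp hj).1
  have hcubound : (p.count c : Int) ≤ b.m := lemax c
  have hv : (b.cnt.insert c (b.cnt.getD c 0 + 1)).getD c 0 = (p.count c : Int) + 1 := by
    rw [PySem.Dict.getD_insert_self, countb]
  have hcnt' : ∀ j, (b.cnt.insert c (b.cnt.getD c 0 + 1)).getD j 0
      = if j = c then (p.count c : Int) + 1 else (p.count j : Int) := by
    intro j
    rw [PySem.Dict.getD_insert]
    by_cases h : j = c <;> simp [h, countb] <;> omega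
  rcases lt_trichotomy b.m ((p.count c : Int) + 1) with hgt | heqc | hlt
  · -- GT: a new maximum; the maxima set resets to [c]
    have hscan : (a.d.insert c (a.d.getD c 0 + 1)).items.foldl ascan (a.m, a.s)
        = ((p.count c : Int) + 1, ([c] : PySem.Set Int)) := by
      by_cases hm0 : 0 < b.m
      · apply scan_gtcase _ _ _ _ c (by rw [meq]; exact hgt)
        · intro iv hiv hivc
          have h2 := (hivmem iv hiv).2
          rw [if_pos hivc] at h2
          exact h2
        · intro iv hiv hivc
          have h2 := (hivmem iv hiv).2
          rw [if_neg hivc] at h2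
          rw [h2, meq]
          exact lemax iv.1
        · intro iv hiv hivm
          have h2 := (hivmem iv hiv).2
          by_cases hivc : iv.1 = c
          · rw [if_pos hivc] at h2
            rw [meq] at hivm
            omega
          · rw [if_neg hivc] at h2
            rw [seq]
            refine (memmx iv.1).mpr ⟨?_, ?_⟩
            · have : (p.count iv.1 : Int) = b.m := by rw [← h2, hivm]; exact meq
              exact_mod_cast lt_of_lt_of_le hm0 (le_of_eq this.symm)
            · rw [← h2, hivm]; exact meq
        · rw [hitems]
          refine List.mem_map.mpr ⟨c, (PySem.Set.mem_ofList l c).mpr hc, ?_⟩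
          simp [hget']
      · -- b.m = 0 forces p = [] and l = c :: rest: c is the first key scanned
        have hm : b.m = 0 := by
          have := lemax c
          have h0 : (0 : Int) ≤ (p.count c : Int) := by positivity
          omega
        have hp : p = [] := by
          cases hx : p with
          | nil => rfl
          | cons x xs =>
            exfalso
            have hxmem : x ∈ p := by rw [hx]; simp
            have h1 : 0 < p.count x := List.count_pos_iff.mpr hxmem
            have h2 := lemax x
            omega
        have hmx : b.maxima = [] := by
          cases hmxx : b.maxima with
          | nil => rfl
          | cons y ys =>
            exfalso
            have : y ∈ p := hmemp y (by rw [hmxx]; simp)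
            rw [hp] at this
            simp at this
        have hcnt0 : ∀ j, p.count j = 0 := by
          intro j
          rw [hp]
          simp
        have hl' : l = c :: rest := by rw [hl, hp]; rfl
        rw [hitems, hl']
        rw [PySem.Set.ofList_cons]
        simp only [List.map_cons, List.foldl_cons]
        have hfc : (a.d.insert c (a.d.getD c 0 + 1)).getD c 0 = (p.count c : Int) + 1 := by
          simp [hget']
        have hstep1 : ascan (a.m, a.s) (c, (a.d.insert c (a.d.getD c 0 + 1)).getD c 0)
            = ((p.count c : Int) + 1, ([c] : PySem.Set Int)) := by
          rw [hfc]
          have hpos : a.m < (p.count c : Int) + 1 := by rw [meq]; exact hgt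
          simp only [ascan]
          rw [if_pos hpos]
          rfl
        rw [hstep1]
        apply scan_noop
        · intro iv hiv
          obtain ⟨k, hk, hkeq⟩ := List.mem_map.mp hiv
          have hkc : k ≠ c := ((PySem.Set.mem_discard _ c k).mp hk).2
          rw [← hkeq]
          simp [hget', hkc, hcnt0] <;> omega
        · intro iv hiv hivv
          obtain ⟨k, hk, hkeq⟩ := List.mem_map.mp hiv
          have hkc : k ≠ c := ((PySem.Set.mem_discard _ c k).mp hk).2
          rw [← hkeq] at hivv
          simp [hget', hkc, hcnt0] at hivv
    have hastep : astep a c = ⟨a.d.insert c (a.d.getD c 0 + 1),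
        ([c] : List Int).foldl (fun d2 i => d2.insert i (d2.getD i 0 + 1)) a.d2,
        (p.count c : Int) + 1, ([c] : PySem.Set Int)⟩ := by
      simp only [astep]
      rw [hscan]
    have hbstep : bstep b c = ⟨b.cnt.insert c (b.cnt.getD c 0 + 1),
        b.entry.insert c (b.t + 1),
        b.maxima.foldl (fun dw j => dw.insert j (dw.getD j 0 + ((b.t + 1) - b.entry.getD j 0))) b.dwell,
        [c], (p.count c : Int) + 1, b.t + 1⟩ := by
      simp only [bstep]
      rw [hv]
      rw [if_pos hgt]
    rw [hastep, hbstep]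
    have hd2get : ∀ j, (([c] : List Int).foldl (fun d2 i => d2.insert i (d2.getD i 0 + 1)) a.d2).getD j 0
        = a.d2.getD j 0 + if j ∈ ([c] : List Int) then 1 else 0 :=
      getD_foldl_insert_delta [c] (fun _ => 1) a.d2 (by simp) 
    have hdwget : ∀ j, (b.maxima.foldl (fun dw j => dw.insert j (dw.getD j 0 + ((b.t + 1) - b.entry.getD j 0))) b.dwell).getD j 0
        = b.dwell.getD j 0 + if j ∈ b.maxima then (b.t + 1) - b.entry.getD j 0 else 0 :=
      getD_foldl_insert_delta b.maxima (fun j => (b.t + 1) - b.entry.getD j 0) b.dwell nodupmx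
    refine ⟨?_, ?_, ?_, ?_, ?_, ?_, ?_, ?_, ?_, ?_, ?_, ?_, ?_, ?_, ?_, ?_, ?_⟩
    · intro j hj
      rcases List.mem_append.mp hj with h | h
      · exact psubl j h
      · simp at h; rw [h]; exact hc
    · exact hkeys'
    · intro j
      show (a.d.insert c (a.d.getD c 0 + 1)).getD j 0 = _
      rw [hget', hcountN j]
      by_cases h : j = c <;> simp [h] <;> omega
    · intro j
      show (b.cnt.insert c (b.cnt.getD c 0 + 1)).getD j 0 = _
      rw [hcnt', hcountN j]
      by_cases h : j = c <;> simp [h] <;> omega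
    · rfl
    · rfl
    · simp
    · intro j
      show j ∈ [c] ↔ _
      simp only [List.mem_singleton]
      rw [hcountN j]
      by_cases h : j = c
      · subst h
        simp <;> omega
      · simp only [if_neg h, add_zero]
        constructor
        · intro hh
          exact absurd hh h
        · intro ⟨h1, h2⟩
          exfalso
          have := lemax j
          omega
    · intro j
      show ((p ++ [c]).count j : Int) ≤ _
      rw [hcountN j]
      by_cases h : j = c
      · subst h; push_cast; omega
      · have := lemax j
        simp only [if_neg h]
        push_cast
        omega
    · intro _
      refine ⟨c, by simp, ?_⟩
      show ((p ++ [c]).count c : Int) = _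
      rw [hcountN c]
      simp
    · show b.t + 1 = _
      rw [teq]
      simp [List.length_append]
    · intro j
      show (([c] : List Int).foldl _ a.d2).getD j 0 = _
      rw [hd2get j, hdwget j, d2dwell j]
      by_cases hjc : j = c
      · subst hjc
        by_cases hjm : j ∈ b.maxima
        · have he := entryle j hjm
          simp only [hjm, if_pos rfl, List.mem_singleton, if_true]
          rw [PySem.Dict.getD_insert_self]
          omega
        · simp only [hjm, if_false, List.mem_singleton, if_pos rfl]
          rw [PySem.Dict.getD_insert_self]
          simp [hjm] <;> omega
      · by_cases hjm : j ∈ b.maxima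
        · simp only [List.mem_singleton, hjc, if_neg hjc, hjm, if_true]
          simp [hjm] <;> omega
        · simp [hjc, hjm]
    · show (([c] : List Int).foldl (fun d2 i => d2.insert i (d2.getD i 0 + 1)) a.d2).keys = _
      rw [PySem.Dict.keys_foldl_insert [c] (fun d2 i => d2.getD i 0 + 1) a.d2, keysd2]
      exact set_update_of_subset _ [c] (by intro x hx; simp at hx; rw [hx]; exact (PySem.Set.mem_ofList l c).mpr hc)
    · intro j hj
      show j ∈ p ++ [c]
      rw [PySem.Dict.keys_foldl_insert b.maxima (fun dw j => dw.getD j 0 + ((b.t + 1) - b.entry.getD j 0)) b.dwell] at hj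
      rcases (mem_set_update _ _ j).mp hj with h | h
      · exact List.mem_append.mpr (Or.inl (dwellkeys j h))
      · exact List.mem_append.mpr (Or.inl (hmemp j h))
    · exact PySem.Dict.nodup_keys_foldl_insert _ _ _ nodupdw
    · intro j hj
      simp at hj
      rw [hj]
      show (b.entry.insert c (b.t + 1)).getD c 0 ≤ b.t + 1
      rw [PySem.Dict.getD_insert_self]
    · intro j
      rw [hdwget j]
      by_cases hjm : j ∈ b.maxima
      · have := entryle j hjm
        have := dwellnn j
        simp only [hjm, if_true]
        omega
      · simp only [hjm, if_false]
        have := dwellnn j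
        omega
  · -- EQ: c joins the maxima set
    have hmpos : (0 : Int) < b.m := by
      have : (0 : Int) ≤ (p.count c : Int) := by positivity
      omega
    have hcnotS : c ∉ a.s := by
      rw [seq]
      intro hmem
      have := ((memmx c).mp hmem).2
      omega
    have hscan : (a.d.insert c (a.d.getD c 0 + 1)).items.foldl ascan (a.m, a.s)
        = (b.m, b.maxima ++ [c]) := by
      have h1 : (a.d.insert c (a.d.getD c 0 + 1)).items.foldl ascan (a.m, a.s) = (a.m, a.s ++ [c]) := by
        apply scan_one _ _ _ c
        · intro iv hiv
          have h2 := (hivmem iv hiv).2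
          by_cases hivc : iv.1 = c
          · rw [if_pos hivc] at h2; rw [h2, meq]; omega
          · rw [if_neg hivc] at h2; rw [h2, meq]; exact lemax iv.1
        · intro iv hiv hivm
          have h2 := (hivmem iv hiv).2
          by_cases hivc : iv.1 = c
          · exact Or.inr hivc
          · rw [if_neg hivc] at h2
            refine Or.inl ?_
            rw [seq]
            refine (memmx iv.1).mpr ⟨?_, ?_⟩
            · have : (p.count iv.1 : Int) = b.m := by rw [← h2, hivm]; exact meq
              exact_mod_cast lt_of_lt_of_le hmpos (le_of_eq this.symm)
            · rw [← h2, hivm]; exact meq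
        · rw [hitems]
          refine List.mem_map.mpr ⟨c, (PySem.Set.mem_ofList l c).mpr hc, ?_⟩
          have : (a.d.insert c (a.d.getD c 0 + 1)).getD c 0 = a.m := by
            rw [hget', meq]
            simp
            omega
          rw [this]
        · exact hcnotS
      rw [h1, meq, seq]
    have hastep : astep a c = ⟨a.d.insert c (a.d.getD c 0 + 1),
        (b.maxima ++ [c]).foldl (fun d2 i => d2.insert i (d2.getD i 0 + 1)) a.d2,
        b.m, b.maxima ++ [c]⟩ := by
      simp only [astep]
      rw [hscan]
    have hbstep : bstep b c = ⟨b.cnt.insert c (b.cnt.getD c 0 + 1),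
        b.entry.insert c (b.t + 1), b.dwell,
        b.maxima ++ [c], b.m, b.t + 1⟩ := by
      simp only [bstep]
      rw [hv]
      rw [if_neg (by omega)]
      rw [if_pos (by rw [beq_iff_eq]; omega)]
    rw [hastep, hbstep]
    have hcnotmx : c ∉ b.maxima := by rw [← seq]; exact hcnotS
    have hnodupmx' : (b.maxima ++ [c]).Nodup := by
      simp [List.nodup_append, nodupmx]
      intro x hx hxc
      exact hcnotmx (hxc ▸ hx)
    have hd2get : ∀ j, ((b.maxima ++ [c]).foldl (fun d2 i => d2.insert i (d2.getD i 0 + 1)) a.d2).getD j 0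
        = a.d2.getD j 0 + if j ∈ b.maxima ++ [c] then 1 else 0 :=
      getD_foldl_insert_delta _ (fun _ => 1) a.d2 hnodupmx'
    refine ⟨?_, ?_, ?_, ?_, ?_, ?_, ?_, ?_, ?_, ?_, ?_, ?_, ?_, ?_, ?_, ?_, ?_⟩
    · intro j hj
      rcases List.mem_append.mp hj with h | h
      · exact psubl j h
      · simp at h; rw [h]; exact hc
    · exact hkeys'
    · intro j
      show (a.d.insert c (a.d.getD c 0 + 1)).getD j 0 = _
      rw [hget', hcountN j]
      by_cases h : j = c <;> simp [h] <;> omega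
    · intro j
      show (b.cnt.insert c (b.cnt.getD c 0 + 1)).getD j 0 = _
      rw [hcnt', hcountN j]
      by_cases h : j = c <;> simp [h] <;> omega
    · rfl
    · rfl
    · exact hnodupmx'
    · intro j
      show j ∈ b.maxima ++ [c] ↔ _
      rw [hcountN j]
      by_cases h : j = c
      · subst h
        simp <;> omega
      · simp only [if_neg h, List.mem_append, List.mem_singleton, h, or_false, add_zero]
        exact memmx j
    · intro j
      show ((p ++ [c]).count j : Int) ≤ _
      rw [hcountN j]
      by_cases h : j = c
      · subst h; push_cast; omega
      · have := lemax j
        simp only [if_neg h]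
        push_cast
        omega
    · intro _
      refine ⟨c, by simp, ?_⟩
      show ((p ++ [c]).count c : Int) = _
      rw [hcountN c]
      push_cast
      omega
    · show b.t + 1 = _
      rw [teq]
      simp [List.length_append]
    · intro j
      show ((b.maxima ++ [c]).foldl _ a.d2).getD j 0 = _
      rw [hd2get j, d2dwell j]
      by_cases hjc : j = c
      · subst hjc
        simp only [hcnotmx, if_false, List.mem_append, List.mem_singleton, or_true, if_true,
          if_pos (Or.inr rfl)]
        rw [PySem.Dict.getD_insert_self]
        simp [hcnotmx] <;> omega
      · by_cases hjm : j ∈ b.maxima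
        · have hje : (b.entry.insert c (b.t + 1)).getD j 0 = b.entry.getD j 0 := by
            rw [PySem.Dict.getD_insert]
            rw [if_neg hjc]
          simp only [hjm, if_true, List.mem_append, List.mem_singleton]
          rw [hje]
          simp [hjm]
          omega
        · have : j ∉ b.maxima ++ [c] := by simp [hjm, hjc]
          simp [hjm, this]
    · show ((b.maxima ++ [c]).foldl (fun d2 i => d2.insert i (d2.getD i 0 + 1)) a.d2).keys = _
      rw [PySem.Dict.keys_foldl_insert _ (fun d2 i => d2.getD i 0 + 1) a.d2, keysd2]
      apply set_update_of_subset
      intro x hx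
      rcases List.mem_append.mp hx with h | h
      · exact (PySem.Set.mem_ofList l x).mpr (psubl x (hmemp x h))
      · simp at h; rw [h]; exact (PySem.Set.mem_ofList l c).mpr hc
    · intro j hj
      exact List.mem_append.mpr (Or.inl (dwellkeys j hj))
    · exact nodupdw
    · intro j hj
      show (b.entry.insert c (b.t + 1)).getD j 0 ≤ b.t + 1
      rw [PySem.Dict.getD_insert]
      by_cases h : j = c
      · rw [if_pos h]
      · rw [if_neg h]
        have hj' : j ∈ b.maxima := by
          rcases List.mem_append.mp hj with h' | h'
          · exact h'
          · simp at h'; exact absurd h' h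
        have := entryle j hj'
        omega
    · exact dwellnn
  · -- LT: nothing changes except the count and the step counter
    have hmpos : (0 : Int) < b.m := by
      have : (0 : Int) ≤ (p.count c : Int) := by positivity
      omega
    have hscan : (a.d.insert c (a.d.getD c 0 + 1)).items.foldl ascan (a.m, a.s)
        = (b.m, b.maxima) := by
      have h1 : (a.d.insert c (a.d.getD c 0 + 1)).items.foldl ascan (a.m, a.s) = (a.m, a.s) := by
        apply scan_noop
        · intro iv hiv
          have h2 := (hivmem iv hiv).2
          by_cases hivc : iv.1 = c
          · rw [if_pos hivc] at h2; rw [h2, meq]; omega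
          · rw [if_neg hivc] at h2; rw [h2, meq]; exact lemax iv.1
        · intro iv hiv hivm
          have h2 := (hivmem iv hiv).2
          by_cases hivc : iv.1 = c
          · rw [if_pos hivc] at h2
            rw [meq] at hivm
            omega
          · rw [if_neg hivc] at h2
            rw [seq]
            refine (memmx iv.1).mpr ⟨?_, ?_⟩
            · have : (p.count iv.1 : Int) = b.m := by rw [← h2, hivm]; exact meq
              exact_mod_cast lt_of_lt_of_le hmpos (le_of_eq this.symm)
            · rw [← h2, hivm]; exact meq
      rw [h1, meq, seq]
    have hastep : astep a c = ⟨a.d.insert c (a.d.getD c 0 + 1),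
        b.maxima.foldl (fun d2 i => d2.insert i (d2.getD i 0 + 1)) a.d2,
        b.m, b.maxima⟩ := by
      simp only [astep]
      rw [hscan]
    have hbstep : bstep b c = ⟨b.cnt.insert c (b.cnt.getD c 0 + 1),
        b.entry, b.dwell, b.maxima, b.m, b.t + 1⟩ := by
      simp only [bstep]
      rw [hv]
      rw [if_neg (by omega)]
      rw [if_neg (by rw [beq_iff_eq]; omega)]
    rw [hastep, hbstep]
    have hd2get : ∀ j, (b.maxima.foldl (fun d2 i => d2.insert i (d2.getD i 0 + 1)) a.d2).getD j 0
        = a.d2.getD j 0 + if j ∈ b.maxima then 1 else 0 :=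
      getD_foldl_insert_delta _ (fun _ => 1) a.d2 nodupmx
    have hcnotmx : c ∉ b.maxima := by
      intro hmem
      have := ((memmx c).mp hmem).2
      omega
    refine ⟨?_, ?_, ?_, ?_, ?_, ?_, ?_, ?_, ?_, ?_, ?_, ?_, ?_, ?_, ?_, ?_, ?_⟩
    · intro j hj
      rcases List.mem_append.mp hj with h | h
      · exact psubl j h
      · simp at h; rw [h]; exact hc
    · exact hkeys'
    · intro j
      show (a.d.insert c (a.d.getD c 0 + 1)).getD j 0 = _
      rw [hget', hcountN j]
      by_cases h : j = c <;> simp [h] <;> omega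
    · intro j
      show (b.cnt.insert c (b.cnt.getD c 0 + 1)).getD j 0 = _
      rw [hcnt', hcountN j]
      by_cases h : j = c <;> simp [h] <;> omega
    · rfl
    · rfl
    · exact nodupmx
    · intro j
      show j ∈ b.maxima ↔ _
      rw [hcountN j]
      by_cases h : j = c
      · subst h
        constructor
        · intro hmem
          exact absurd hmem hcnotmx
        · intro ⟨h1, h2⟩
          exfalso
          simp at h2
          omega
      · simp only [if_neg h, add_zero]
        exact memmx j
    · intro j
      show ((p ++ [c]).count j : Int) ≤ _
      rw [hcountN j]
      by_cases h : j = c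
      · subst h; push_cast; omega
      · have := lemax j
        simp only [if_neg h]
        push_cast
        omega
    · intro _
      obtain ⟨j, hjp, hjm⟩ := achieved hmpos
      have hjc : j ≠ c := by
        intro h
        rw [h] at hjm
        omega
      refine ⟨j, List.mem_append.mpr (Or.inl hjp), ?_⟩
      show ((p ++ [c]).count j : Int) = _
      rw [hcountN j]
      simp [hjc, hjm]
    · show b.t + 1 = _
      rw [teq]
      simp [List.length_append]
    · intro j
      show (b.maxima.foldl _ a.d2).getD j 0 = _
      rw [hd2get j, d2dwell j]
      by_cases hjm : j ∈ b.maxima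
      · simp only [hjm, if_true]
        omega
      · simp [hjm]
    · show (b.maxima.foldl (fun d2 i => d2.insert i (d2.getD i 0 + 1)) a.d2).keys = _
      rw [PySem.Dict.keys_foldl_insert _ (fun d2 i => d2.getD i 0 + 1) a.d2, keysd2]
      apply set_update_of_subset
      intro x hx
      exact (PySem.Set.mem_ofList l x).mpr (psubl x (hmemp x hx))
    · intro j hj
      exact List.mem_append.mpr (Or.inl (dwellkeys j hj))
    · exact nodupdw
    · intro j hj
      have := entryle j hj
      show b.entry.getD j 0 ≤ b.t + 1
      omega
    · exact dwellnn

theorem inv_run (l : List Int) (rest p : List Int) (a : ASt) (b : BSt)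
    (hl : l = p ++ rest) (hinv : PVInv l p a b) :
    PVInv l (p ++ rest) (rest.foldl astep a) (rest.foldl bstep b) := by
  induction rest generalizing p a b with
  | nil => simpa using hinv
  | cons c t ih =>
    have h := ih (p ++ [c]) (astep a c) (bstep b c) (by rw [hl]; simp)
      (inv_step l p t a b c hl hinv)
    simpa using h

-- A's result equals B's result, given the coupled final states
theorem final_max_eq (l : List Int) (hne : l ≠ []) (a : ASt) (b : BSt)
    (hinv : PVInv l l a b) :
    (PySem.List.max? a.d2.values (fun x => x)).getD 0
      = (PySem.List.max? ((b.maxima.foldl (fun dw j => dw.insert j (dw.getD j 0 + (b.t - b.entry.getD j 0 + 1))) b.dwell).values) (fun x => x)).getD 0 := by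
  obtain ⟨psubl, keysd, countd, countb, meq, seq, nodupmx, memmx, lemax, achieved, teq,
    d2dwell, keysd2, dwellkeys, nodupdw, entryle, dwellnn⟩ := hinv
  set dwF := b.maxima.foldl (fun dw j => dw.insert j (dw.getD j 0 + (b.t - b.entry.getD j 0 + 1))) b.dwell with hdwF
  have hget : ∀ j, dwF.getD j 0 = b.dwell.getD j 0 + if j ∈ b.maxima then b.t - b.entry.getD j 0 + 1 else 0 :=
    getD_foldl_insert_delta b.maxima (fun j => b.t - b.entry.getD j 0 + 1) b.dwell nodupmx
  have hsame : ∀ j, dwF.getD j 0 = a.d2.getD j 0 := by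
    intro j
    rw [hget j, d2dwell j]
  have hkeysF : dwF.keys = PySem.Set.update b.dwell.keys b.maxima := by
    rw [hdwF]
    exact PySem.Dict.keys_foldl_insert _ _ _
  have hnodupF : dwF.keys.Nodup := PySem.Dict.nodup_keys_foldl_insert _ _ _ nodupdw
  obtain ⟨x0, hx0⟩ := List.exists_mem_of_ne_nil l hne
  have hmpos : (0 : Int) < b.m := by
    have h1 : 0 < l.count x0 := List.count_pos_iff.mpr hx0
    have h2 := lemax x0
    omega
  obtain ⟨jm, hjml, hjmc⟩ := achieved hmpos
  have hjmmx : jm ∈ b.maxima := (memmx jm).mpr ⟨List.count_pos_iff.mpr hjml, hjmc⟩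
  have hjmk : jm ∈ dwF.keys := by
    rw [hkeysF]
    exact (mem_set_update _ _ jm).mpr (Or.inr hjmmx)
  have hfjm : 1 ≤ dwF.getD jm 0 := by
    rw [hget jm]
    have h1 := dwellnn jm
    have h2 := entryle jm hjmmx
    simp only [hjmmx, if_true]
    omega
  have hvalsA : a.d2.values = (PySem.Set.ofList l).map (fun k => a.d2.getD k 0) := by
    rw [PySem.Dict.values_eq_map_keys a.d2 (by rw [keysd2]; exact PySem.Set.nodup_ofList l) 0, keysd2]
  have hvalsF : dwF.values = dwF.keys.map (fun k => dwF.getD k 0) :=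
    PySem.Dict.values_eq_map_keys dwF hnodupF 0
  have hjmem : dwF.getD jm 0 ∈ dwF.values := by
    rw [hvalsF]
    exact List.mem_map_of_mem hjmk
  have hvalsAne : a.d2.values ≠ [] := by
    rw [hvalsA]
    intro h
    have : jm ∈ (PySem.Set.ofList l) := (PySem.Set.mem_ofList l jm).mpr hjml
    rw [List.map_eq_nil_iff.mp h] at this
    simp at this
  have hvalsFne : dwF.values ≠ [] := by
    intro h
    rw [h] at hjmem
    simp at hjmem
  cases hMA : PySem.List.max? a.d2.values (fun x => x) with
  | none => exact absurd ((PySem.List.max?_eq_none_iff _ _).mp hMA) hvalsAne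
  | some MA =>
  cases hMB : PySem.List.max? dwF.values (fun x => x) with
  | none => exact absurd ((PySem.List.max?_eq_none_iff _ _).mp hMB) hvalsFne
  | some MB =>
  have hBjm : dwF.getD jm 0 ≤ MB := PySem.List.max?_isMax hMB _ hjmem
  have hMAB : MA = MB := by
    apply le_antisymm
    · have hmemA := PySem.List.max?_mem hMA
      rw [hvalsA] at hmemA
      obtain ⟨k, hk, hkeq⟩ := List.mem_map.mp hmemA
      have hMAk : MA = dwF.getD k 0 := by rw [← hkeq, hsame k]
      by_cases hkF : k ∈ dwF.keys
      · have : dwF.getD k 0 ∈ dwF.values := by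
          rw [hvalsF]
          exact List.mem_map_of_mem hkF
        have := PySem.List.max?_isMax hMB _ this
        omega
      · have hk0 : dwF.getD k 0 = 0 := by
          rw [PySem.Dict.getD_eq_get?_getD, (PySem.Dict.get?_eq_none_iff_not_mem_keys dwF k).mpr hkF]
          rfl
        omega
    · have hmemB := PySem.List.max?_mem hMB
      rw [hvalsF] at hmemB
      obtain ⟨k, hk, hkeq⟩ := List.mem_map.mp hmemB
      have hkl : k ∈ l := by
        rw [hkeysF] at hk
        rcases (mem_set_update _ _ k).mp hk with h | h
        · exact dwellkeys k h
        · exact List.count_pos_iff.mp ((memmx k).mp h).1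
      have : a.d2.getD k 0 ∈ a.d2.values := by
        rw [hvalsA]
        exact List.mem_map_of_mem ((PySem.Set.mem_ofList l k).mpr hkl)
      have hle := PySem.List.max?_isMax hMA _ this
      have : MB = a.d2.getD k 0 := by rw [← hkeq, hsame k]
      omega
  rw [hMAB]

-- ===== VERDICT (by name: the statement is the Claim_ definition above) =====
theorem get_maximum_maxima2_spec : Claim_equal_get_maximum_maxima2 := by
  unfold Claim_equal_get_maximum_maxima2
  intro l _ hne
  have hne' : l ≠ [] := hne
  unfold Spec_get_maximum_maxima2
  have hinv : PVInv l l
      (l.foldl astep ⟨l.foldl (fun d c => d.insert c 0) PySem.Dict.empty,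
        l.foldl (fun d c => d.insert c 0) PySem.Dict.empty, 0, PySem.Set.empty⟩)
      (l.foldl bstep ⟨PySem.Dict.empty, PySem.Dict.empty, PySem.Dict.empty, [], 0, 0⟩) := by
    have h := inv_run l l [] _ _ (by simp) (inv_init l)
    simpa using h
  simp only [get_maximum_maxima2, get_maximum_maxima2_alt]
  exact final_max_eq l hne' _ _ hinv
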